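-- pv_equiv track=rewrite | github.com/grapheneaffiliate/h4-polytopic-attention | solve_arc_b19.py | solve_be94b721
-- ===== SOURCE A (Python) =====
-- def solve_be94b721(grid):
--     rows = len(grid)
--     cols = len(grid[0])
--     from collections import defaultdict
--     color_cells = defaultdict(list)
--     for r in range(rows):
--         for c in range(cols):
--             if grid[r][c] != 0:
--                 color_cells[grid[r][c]].append((r, c))
--     best_color = max(color_cells, key=lambda k: len(color_cells[k]))
--     cells = color_cells[best_color]
--     min_r = min(r for r, c in cells)
--     max_r = max(r for r, c in cells)
--     min_c = min(c for r, c in cells)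
--     max_c = max(c for r, c in cells)
--     output = []
--     for r in range(min_r, max_r + 1):
--         row = []
--         for c in range(min_c, max_c + 1):
--             if grid[r][c] == best_color:
--                 row.append(best_color)
--             else:
--                 row.append(0)
--         output.append(row)
--     return output
-- ===== SOURCE B (Python) =====
-- def solve_be94b721(grid):
--     cols = len(grid[0])
--     # stage 1: flatten the nonzero values in row-major order and count them
--     flat = [v for row in grid for v in row[:cols] if v != 0]
--     counts = {}
--     for v in flat:
--         counts[v] = counts.get(v, 0) + 1
--     best = max(counts, key=counts.get)
--     # stage 2: row extent = first/last row containing best; column extent = min/max matching column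
--     rows_with = [r for r in range(len(grid)) if best in grid[r][:cols]]
--     min_r, max_r = rows_with[0], rows_with[-1]
--     cs = [c for row in grid for c in range(cols) if row[c] == best]
--     min_c, max_c = min(cs), max(cs)
--     return [[best if grid[r][c] == best else 0 for c in range(min_c, max_c + 1)]
--             for r in range(min_r, max_r + 1)]
-- ===== Notes on version B (the rewrite author's own statement) =====
-- stated objective: alternative
-- what changed: Replaces A's per-color dict of full cell lists (then argmax by list length and four min/max passes over the winner's cells) by staged passes that never store positions per color: flatten the nonzero values and count them in a frequency dict to pick the best color, then find the row extent as the first/last row containing that color by membership tests on row slices and the column extent as min/max over a comprehension of matching column indices.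
import Mathlib
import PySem

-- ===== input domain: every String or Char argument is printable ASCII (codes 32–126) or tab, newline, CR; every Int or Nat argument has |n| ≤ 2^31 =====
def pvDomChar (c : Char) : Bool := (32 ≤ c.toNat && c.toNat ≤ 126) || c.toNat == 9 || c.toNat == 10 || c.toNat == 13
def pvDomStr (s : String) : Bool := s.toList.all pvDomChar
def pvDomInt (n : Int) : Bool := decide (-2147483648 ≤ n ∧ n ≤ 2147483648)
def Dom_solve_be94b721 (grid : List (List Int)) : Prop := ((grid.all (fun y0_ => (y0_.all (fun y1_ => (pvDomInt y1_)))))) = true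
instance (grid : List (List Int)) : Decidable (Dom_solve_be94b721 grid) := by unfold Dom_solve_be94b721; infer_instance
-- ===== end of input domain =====

-- B replaces A's per-color dict of cell lists (argmax by list length, then four min/max
-- passes over the winner's cells) by staged passes that store no positions: flatten and
-- count the nonzero values to pick the best color, then locate the row extent as the
-- first/last row containing it and the column extent as min/max of the matching columns
-- (objective: alternative).

-- ===== PORT A =====
-- the defaultdict-of-cell-lists loop of A ('for r in range(rows): for c in range(cols): …append((r,c))')
def pvCC (grid : List (List Int)) : PySem.Dict Int (List (Int × Int)) :=
  (PySem.List.pyRange 0 (grid.length : Int) 1).foldl (fun d r =>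
    (PySem.List.pyRange 0 ((PySem.List.pyGetD grid 0 []).length : Int) 1).foldl (fun d c =>
      if PySem.List.pyGetD (PySem.List.pyGetD grid r []) c 0 ≠ 0 then
        d.modify (PySem.List.pyGetD (PySem.List.pyGetD grid r []) c 0) [] (fun cs => cs ++ [(r, c)])
      else d) d) PySem.Dict.empty

def solve_be94b721 (grid : List (List Int)) : List (List Int) :=
  let color_cells := pvCC grid
  -- max(color_cells, key=…): none = ValueError on an all-zero grid, excluded by Pre_
  match PySem.List.max? color_cells.keys (fun k => ((color_cells.getD k []).length : Int)) with
  | none => []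
  | some best_color =>
    let cells := color_cells.getD best_color []
    -- cells is never empty when best_color exists, so the .getD 0 defaults are unreachable
    let min_r := (PySem.List.min? (cells.map (fun p => p.1)) (fun x => x)).getD 0
    let max_r := (PySem.List.max? (cells.map (fun p => p.1)) (fun x => x)).getD 0
    let min_c := (PySem.List.min? (cells.map (fun p => p.2)) (fun x => x)).getD 0
    let max_c := (PySem.List.max? (cells.map (fun p => p.2)) (fun x => x)).getD 0
    (PySem.List.pyRange min_r (max_r + 1) 1).foldl (fun output r =>
      output ++ [(PySem.List.pyRange min_c (max_c + 1) 1).foldl (fun row c =>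
        row ++ [if PySem.List.pyGetD (PySem.List.pyGetD grid r []) c 0 = best_color then best_color else 0]) []]) []

-- ===== PORT B =====
-- flat = [v for row in grid for v in row[:cols] if v != 0]
def pvFlat (grid : List (List Int)) : List Int :=
  grid.flatMap (fun row =>
    (PySem.List.slice row none (some ((PySem.List.pyGetD grid 0 []).length : Int))).filter
      (fun v => v != 0))

-- counts = {}; for v in flat: counts[v] = counts.get(v, 0) + 1
def pvCounts (grid : List (List Int)) : PySem.Dict Int Int :=
  (pvFlat grid).foldl (fun d v => d.insert v (d.getD v 0 + 1)) PySem.Dict.empty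

def solve_be94b721_alt (grid : List (List Int)) : List (List Int) :=
  let counts := pvCounts grid
  -- max(counts, key=counts.get): none = ValueError on an all-zero grid, excluded by Pre_
  match PySem.List.max? counts.keys (fun k => counts.getD k 0) with
  | none => []
  | some best =>
    -- rows_with = [r for r in range(len(grid)) if best in grid[r][:cols]]
    let rows_with := (PySem.List.pyRange 0 (grid.length : Int) 1).filter (fun r =>
      (PySem.List.slice (PySem.List.pyGetD grid r []) none
        (some ((PySem.List.pyGetD grid 0 []).length : Int))).contains best)
    -- rows_with[0] / rows_with[-1]; nonempty under Pre_, so the .getD 0 defaults are unreachable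
    let min_r := rows_with.head?.getD 0
    let max_r := rows_with.getLast?.getD 0
    -- cs = [c for row in grid for c in range(cols) if row[c] == best]
    let cs := grid.flatMap (fun row =>
      (PySem.List.pyRange 0 ((PySem.List.pyGetD grid 0 []).length : Int) 1).filter
        (fun c => PySem.List.pyGetD row c 0 == best))
    let min_c := (PySem.List.min? cs (fun x => x)).getD 0
    let max_c := (PySem.List.max? cs (fun x => x)).getD 0
    (PySem.List.pyRange min_r (max_r + 1) 1).map (fun r =>
      (PySem.List.pyRange min_c (max_c + 1) 1).map (fun c =>
        if PySem.List.pyGetD (PySem.List.pyGetD grid r []) c 0 = best then best else 0))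

-- ===== PRECONDITION & SPEC =====
-- Pre_ is exactly the set of inputs on which Python A returns: grid nonempty (else IndexError on
-- grid[0]), every row at least cols = len(grid[0]) long (else IndexError during the scan), and some
-- nonzero value among the first cols entries of some row (else ValueError from max on an empty dict).
def Pre_solve_be94b721 (grid : List (List Int)) : Prop :=
  grid ≠ [] ∧ (∀ row ∈ grid, (grid.headD []).length ≤ row.length) ∧
    ∃ row ∈ grid, ∃ x ∈ row.take (grid.headD []).length, x ≠ 0
instance (grid : List (List Int)) : Decidable (Pre_solve_be94b721 grid) := by
  unfold Pre_solve_be94b721; infer_instance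

def pvWitness_solve_be94b721 : List (List Int) := [[0, 3], [3, 5]]

def Spec_solve_be94b721 (grid : List (List Int)) (out : List (List Int)) : Prop := out = solve_be94b721_alt grid
instance (grid : List (List Int)) (out : List (List Int)) : Decidable (Spec_solve_be94b721 grid out) := by unfold Spec_solve_be94b721; infer_instance

-- ===== CLAIM (what is proved, stated in full; the proofs are below) =====
def Claim_equal_solve_be94b721 : Prop := ∀ (grid : List (List Int)), Dom_solve_be94b721 grid → Pre_solve_be94b721 grid → Spec_solve_be94b721 grid (solve_be94b721 grid)

-- ===== LEMMAS AND PROOFS =====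

-- the row-major stream of (color, (row, col)) for the nonzero cells A visits
def pvPairs (grid : List (List Int)) : List (Int × (Int × Int)) :=
  (PySem.List.pyRange 0 (grid.length : Int) 1).flatMap (fun r =>
    ((PySem.List.pyRange 0 ((PySem.List.pyGetD grid 0 []).length : Int) 1).filter
      (fun c => PySem.List.pyGetD (PySem.List.pyGetD grid r []) c 0 != 0)).map
      (fun c => (PySem.List.pyGetD (PySem.List.pyGetD grid r []) c 0, (r, c))))

-- the columns of row r holding color b
def pvRowMatch (grid : List (List Int)) (b r : Int) : List Int :=
  (PySem.List.pyRange 0 ((PySem.List.pyGetD grid 0 []).length : Int) 1).filter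
    (fun c => PySem.List.pyGetD (PySem.List.pyGetD grid r []) c 0 == b)

lemma pvCols_eq (grid : List (List Int)) :
    (PySem.List.pyGetD grid 0 []).length = (grid.headD []).length := by
  cases grid <;> simp [PySem.List.pyGetD, PySem.List.pyGet?, PySem.List.pyIdx?]

-- A's nested scan is the modify-append fold over the cell stream
lemma pvCC_eq_fold (grid : List (List Int)) :
    pvCC grid = (pvPairs grid).foldl (fun d p => d.modify p.1 [] (fun x => x ++ [p.2]))
      PySem.Dict.empty := by
  unfold pvCC pvPairs
  rw [List.foldl_flatMap]
  congr 1
  funext d r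
  rw [List.foldl_map, List.foldl_filter]
  congr 1
  funext d c
  by_cases h : PySem.List.pyGetD (PySem.List.pyGetD grid r []) c 0 = 0 <;> simp [h]

lemma pvCC_getD (grid : List (List Int)) (k : Int) :
    (pvCC grid).getD k [] = ((pvPairs grid).filter (fun p => p.1 == k)).map (fun p => p.2) := by
  rw [pvCC_eq_fold, PySem.Dict.getD_foldl_modify_append]
  simp [PySem.Dict.getD, PySem.Dict.get?, PySem.Dict.empty]

lemma pvCC_keys (grid : List (List Int)) :
    (pvCC grid).keys = PySem.Set.ofList ((pvPairs grid).map (fun p => p.1)) := by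
  rw [pvCC_eq_fold,
    PySem.Dict.keys_foldl_modify_key (pvPairs grid) (fun p => p.1) [] (fun _ p => (fun x => x ++ [p.2]))]
  rfl

-- one row of B's flattening, as the per-column scan A performs
lemma pvRow_flat (row : List Int) (cols : Nat) (hlen : cols ≤ row.length) :
    (PySem.List.slice row none (some (cols : Int))).filter (fun v => v != 0)
      = ((PySem.List.pyRange 0 (cols : Int) 1).filter
          (fun c => PySem.List.pyGetD row c 0 != 0)).map (fun c => PySem.List.pyGetD row c 0) := by
  rw [PySem.List.slice_to_natCast]
  have hlen' : (row.take cols).length = cols := by simp [Nat.min_eq_left hlen]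
  have hpt : ∀ c ∈ PySem.List.pyRange 0 (cols : Int) 1,
      PySem.List.pyGetD (row.take cols) c 0 = PySem.List.pyGetD row c 0 := by
    intro c hc
    rw [PySem.List.mem_pyRange_one] at hc
    rw [PySem.List.pyGetD_eq_getElem _ _ hc.1 (by rw [hlen']; exact_mod_cast hc.2),
      PySem.List.pyGetD_eq_getElem _ _ hc.1
        (by exact lt_of_lt_of_le (by exact_mod_cast hc.2) (by exact_mod_cast hlen)),
      List.getElem_take]
  conv_lhs => rw [← PySem.List.map_pyGetD_pyRange_zero' (row.take cols) 0, hlen']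
  rw [List.filter_map]
  have h1 : List.filter ((fun v => v != 0) ∘ fun j => PySem.List.pyGetD (List.take cols row) j 0)
      (PySem.List.pyRange 0 (cols : Int) 1)
      = List.filter (fun c => PySem.List.pyGetD row c 0 != 0) (PySem.List.pyRange 0 (cols : Int) 1) :=
    List.filter_congr (fun c hc => by simp only [Function.comp_apply, hpt c hc])
  rw [h1, List.map_congr_left (fun c hc => hpt c (List.mem_of_mem_filter hc))]

-- B's flat list is exactly the colors of A's cell stream
lemma pvFlat_eq (grid : List (List Int)) (hpre : Pre_solve_be94b721 grid) :
    pvFlat grid = (pvPairs grid).map (fun p => p.1) := by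
  obtain ⟨-, hlen, -⟩ := hpre
  unfold pvFlat pvPairs
  set m := (PySem.List.pyGetD grid 0 []).length with hm
  conv_lhs => rw [← PySem.List.map_pyGetD_pyRange_zero' grid []]
  rw [List.flatMap_map, List.map_flatMap]
  refine List.flatMap_congr ?_
  intro r hr
  rw [PySem.List.mem_pyRange_one] at hr
  have hmem : PySem.List.pyGetD grid r [] ∈ grid := by
    rw [PySem.List.pyGetD_eq_getElem grid [] hr.1 hr.2]
    exact List.getElem_mem _
  have hl : m ≤ (PySem.List.pyGetD grid r []).length := by
    rw [hm, pvCols_eq]; exact hlen _ hmem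
  rw [pvRow_flat _ _ hl, List.map_map]
  rfl

-- A's per-color cell count is the count in the flat color list
lemma pvKey_eq (P : List (Int × (Int × Int))) :
    (fun k : Int => (((P.filter (fun p => p.1 == k)).map (fun p => p.2)).length : Int))
      = (fun k : Int => ((P.map (fun p => p.1)).count k : Int)) := by
  funext k
  rw [List.length_map, List.count_eq_countP, List.countP_map, List.countP_eq_length_filter]
  rfl

-- the winner's cells, row by row (b ≠ 0 folds the two filters into one)
lemma pvFilter_pairs (grid : List (List Int)) (b : Int) (hb : b ≠ 0) :
    (pvPairs grid).filter (fun p => p.1 == b)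
      = (PySem.List.pyRange 0 (grid.length : Int) 1).flatMap (fun r =>
          (pvRowMatch grid b r).map
            (fun c => (PySem.List.pyGetD (PySem.List.pyGetD grid r []) c 0, (r, c)))) := by
  unfold pvPairs pvRowMatch
  rw [List.filter_flatMap]
  refine List.flatMap_congr (fun r _ => ?_)
  rw [List.filter_map, List.filter_filter]
  congr 1
  refine List.filter_congr (fun c _ => ?_)
  by_cases h : PySem.List.pyGetD (PySem.List.pyGetD grid r []) c 0 = b
  · simp [h, hb]
  · simp [h]

lemma pvCells_fst (grid : List (List Int)) (b : Int) (hb : b ≠ 0) :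
    (((pvPairs grid).filter (fun p => p.1 == b)).map (fun p => p.2)).map (fun p => p.1)
      = (PySem.List.pyRange 0 (grid.length : Int) 1).flatMap
          (fun r => (pvRowMatch grid b r).map (fun _ => r)) := by
  rw [pvFilter_pairs grid b hb, List.map_flatMap, List.map_flatMap]
  exact List.flatMap_congr (fun r _ => by simp only [List.map_map, Function.comp_def])

lemma pvCells_snd (grid : List (List Int)) (b : Int) (hb : b ≠ 0) :
    (((pvPairs grid).filter (fun p => p.1 == b)).map (fun p => p.2)).map (fun p => p.2)
      = (PySem.List.pyRange 0 (grid.length : Int) 1).flatMap (pvRowMatch grid b) := by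
  rw [pvFilter_pairs grid b hb, List.map_flatMap, List.map_flatMap]
  exact List.flatMap_congr (fun r _ => by
    simp only [List.map_map, Function.comp_def, List.map_id'])

-- B's column comprehension is the winner's columns row by row
lemma pvCs_eq (grid : List (List Int)) (b : Int) :
    grid.flatMap (fun row =>
        (PySem.List.pyRange 0 ((PySem.List.pyGetD grid 0 []).length : Int) 1).filter
          (fun c => PySem.List.pyGetD row c 0 == b))
      = (PySem.List.pyRange 0 (grid.length : Int) 1).flatMap (pvRowMatch grid b) := by
  unfold pvRowMatch
  generalize (PySem.List.pyGetD grid 0 []).length = n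
  conv_lhs => rw [← PySem.List.map_pyGetD_pyRange_zero' grid []]
  rw [List.flatMap_map]

-- head of the blocked row list = first row with a match
lemma pvBlk_head {α : Type} (rs : List Int) (g : Int → List α) :
    (rs.flatMap (fun r => (g r).map (fun _ => r))).head?
      = (rs.filter (fun r => !(g r).isEmpty)).head? := by
  induction rs with
  | nil => rfl
  | cons r t ih =>
    cases hgr : g r with
    | nil => simpa [List.flatMap_cons, hgr] using ih
    | cons a s => simp [List.flatMap_cons, hgr, List.head?_replicate]

lemma pvBlk_getLast {α : Type} (rs : List Int) (g : Int → List α) :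
    (rs.flatMap (fun r => (g r).map (fun _ => r))).getLast?
      = (rs.filter (fun r => !(g r).isEmpty)).getLast? := by
  rw [List.getLast?_eq_head?_reverse, List.getLast?_eq_head?_reverse,
    List.reverse_flatMap, ← List.filter_reverse]
  have h2 : List.flatMap ((fun r => List.map (fun _ => r) (g r)) · |>.reverse) rs.reverse
      = List.flatMap (fun r => ((g r).reverse).map (fun _ => r)) rs.reverse :=
    List.flatMap_congr (fun r _ => by simp)
  rw [show (List.reverse ∘ fun r => List.map (fun x => r) (g r))
      = fun r => (List.map (fun _ => r) (g r)).reverse from rfl]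
  rw [h2, pvBlk_head]
  congr 1
  exact List.filter_congr (fun r _ => by simp)

lemma pvBlk_pairwise (rs : List Int) (h : rs.Pairwise (· < ·)) {α : Type} (g : Int → List α) :
    (rs.flatMap (fun r => (g r).map (fun _ => r))).Pairwise (· ≤ ·) := by
  refine List.pairwise_flatMap.mpr ⟨?_, ?_⟩
  · intro a _
    rw [show (fun _ : α => a) = Function.const α a from rfl, List.map_const]
    exact List.pairwise_replicate.mpr (Or.inr le_rfl)
  · refine h.imp ?_
    intro r1 r2 hlt x hx y hy
    obtain ⟨-, -, rfl⟩ := List.mem_map.1 hx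
    obtain ⟨-, -, rfl⟩ := List.mem_map.1 hy
    exact le_of_lt hlt

lemma pv_le_getLast (l : List Int) (h : l.Pairwise (· ≤ ·)) (y : Int) (hy : y ∈ l) (hne : l ≠ []) :
    y ≤ l.getLast hne := by
  induction l with
  | nil => cases hy
  | cons x t ih =>
    by_cases ht : t = []
    · subst ht; simp at hy; simp [hy]
    · rw [List.getLast_cons ht]
      rcases List.mem_cons.1 hy with rfl | hyt
      · exact (List.pairwise_cons.1 h).1 _ (List.getLast_mem ht)
      · exact ih ((List.pairwise_cons.1 h).2) hyt ht

-- Python min/max on a nondecreasing list are its first/last element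
lemma pvMin_sorted (l : List Int) (h : l.Pairwise (· ≤ ·)) :
    PySem.List.min? l (fun x => x) = l.head? := by
  cases l with
  | nil => simp [PySem.List.min?]
  | cons x t =>
    cases hm : PySem.List.min? (x :: t) (fun x => x) with
    | none => exact absurd ((PySem.List.min?_eq_none_iff _ _).1 hm) (by simp)
    | some m =>
      have hmem := PySem.List.min?_mem hm
      have hmin := PySem.List.min?_isMin hm
      have h1 : m ≤ x := hmin x List.mem_cons_self
      have h2 : x ≤ m := by
        rcases List.mem_cons.1 hmem with rfl | hmt
        · exact le_rfl
        · exact (List.pairwise_cons.1 h).1 m hmt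
      simp [le_antisymm h1 h2]

lemma pvMax_sorted (l : List Int) (h : l.Pairwise (· ≤ ·)) :
    PySem.List.max? l (fun x => x) = l.getLast? := by
  cases hl : l with
  | nil => simp [PySem.List.max?]
  | cons x t =>
    subst hl
    have hne : x :: t ≠ [] := by simp
    cases hm : PySem.List.max? (x :: t) (fun x => x) with
    | none => exact absurd ((PySem.List.max?_eq_none_iff _ _).1 hm) hne
    | some m =>
      have hmem := PySem.List.max?_mem hm
      have hmax := PySem.List.max?_isMax hm
      have h1 : (x :: t).getLast hne ≤ m := hmax _ (List.getLast_mem hne)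
      have h2 : m ≤ (x :: t).getLast hne := pv_le_getLast _ h m hmem hne
      rw [List.getLast?_eq_some_getLast hne, le_antisymm h2 h1]

-- B's membership test on a row slice = "this row has a matching column"
lemma pvContains_eq (grid : List (List Int)) (b r : Int)
    (hl : (PySem.List.pyGetD grid 0 []).length ≤ (PySem.List.pyGetD grid r []).length) :
    (PySem.List.slice (PySem.List.pyGetD grid r []) none
        (some ((PySem.List.pyGetD grid 0 []).length : Int))).contains b
      = !(pvRowMatch grid b r).isEmpty := by
  set row := PySem.List.pyGetD grid r [] with hrow
  set cols := (PySem.List.pyGetD grid 0 []).length with hcols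
  rw [PySem.List.slice_to_natCast]
  have hlen' : (row.take cols).length = cols := by simp [Nat.min_eq_left hl]
  have htk : row.take cols = (PySem.List.pyRange 0 (cols : Int) 1).map
      (fun c => PySem.List.pyGetD row c 0) := by
    conv_lhs => rw [← PySem.List.map_pyGetD_pyRange_zero' (row.take cols) 0, hlen']
    refine List.map_congr_left (fun c hc => ?_)
    rw [PySem.List.mem_pyRange_one] at hc
    rw [PySem.List.pyGetD_eq_getElem _ _ hc.1 (by rw [hlen']; exact_mod_cast hc.2),
      PySem.List.pyGetD_eq_getElem _ _ hc.1
        (by exact lt_of_lt_of_le (by exact_mod_cast hc.2) (by exact_mod_cast hl)),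
      List.getElem_take]
  rw [htk]
  unfold pvRowMatch
  rw [Bool.eq_iff_iff]
  simp only [List.contains_iff_exists_mem_beq, List.mem_map, Bool.not_eq_eq_eq_not,
    Bool.not_true, List.isEmpty_eq_false_iff, ne_eq]
  constructor
  · rintro ⟨v, ⟨c, hc, rfl⟩, hbeq⟩
    intro hnil
    have : c ∈ List.filter (fun c => PySem.List.pyGetD row c 0 == b)
        (PySem.List.pyRange 0 (cols : Int) 1) :=
      List.mem_filter.2 ⟨hc, by simpa [BEq.comm] using hbeq⟩
    rw [hnil] at this; cases this
  · intro hne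
    rcases List.exists_mem_of_ne_nil _ hne with ⟨c, hc⟩
    have := List.mem_filter.1 hc
    exact ⟨PySem.List.pyGetD row c 0, ⟨c, this.1, rfl⟩, by simpa [BEq.comm] using this.2⟩

-- ===== VERDICT (by name: the statement is the Claim_ definition above) =====
theorem solve_be94b721_spec : Claim_equal_solve_be94b721 := by
  unfold Claim_equal_solve_be94b721
  intro grid _ hpre
  unfold Spec_solve_be94b721 solve_be94b721 solve_be94b721_alt
  have hPc : pvCounts grid = PySem.Dict.counter (pvFlat grid) := by
    unfold pvCounts; exact PySem.Dict.foldl_insert_getD_add_one_eq_counter _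
  simp only [hPc, PySem.Dict.keys_counter, PySem.Dict.getD_counter, pvFlat_eq grid hpre,
    pvCC_keys, pvCC_getD, pvKey_eq]
  cases hbest : PySem.List.max? (PySem.Set.ofList ((pvPairs grid).map (fun p => p.1)))
      (fun k => (((pvPairs grid).map (fun p => p.1)).count k : Int)) with
  | none => rfl
  | some best =>
    have hbfst : best ∈ (pvPairs grid).map (fun p => p.1) :=
      (PySem.Set.mem_ofList _ _).1 (PySem.List.max?_mem hbest)
    have hb0 : best ≠ 0 := by
      rw [← pvFlat_eq grid hpre] at hbfst
      unfold pvFlat at hbfst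
      obtain ⟨row, -, h2⟩ := List.mem_flatMap.1 hbfst
      simpa using (List.mem_filter.1 h2).2
    have hlenr : ∀ r ∈ PySem.List.pyRange 0 (grid.length : Int) 1,
        (PySem.List.pyGetD grid 0 []).length ≤ (PySem.List.pyGetD grid r []).length := by
      intro r hr
      rw [PySem.List.mem_pyRange_one] at hr
      have hmem : PySem.List.pyGetD grid r [] ∈ grid := by
        rw [PySem.List.pyGetD_eq_getElem grid [] hr.1 hr.2]
        exact List.getElem_mem _
      rw [pvCols_eq]; exact hpre.2.1 _ hmem
    have hrw : (PySem.List.pyRange 0 (grid.length : Int) 1).filter (fun r =>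
          (PySem.List.slice (PySem.List.pyGetD grid r []) none
            (some ((PySem.List.pyGetD grid 0 []).length : Int))).contains best)
        = (PySem.List.pyRange 0 (grid.length : Int) 1).filter
            (fun r => !(pvRowMatch grid best r).isEmpty) :=
      List.filter_congr (fun r hr => pvContains_eq grid best r (hlenr r hr))
    have hpw := pvBlk_pairwise (PySem.List.pyRange 0 (grid.length : Int) 1)
      (PySem.List.pairwise_lt_pyRange_one 0 (grid.length : Int)) (pvRowMatch grid best)
    simp only [pvCells_fst grid best hb0, pvCells_snd grid best hb0, pvCs_eq grid best, hrw,
      pvMin_sorted _ hpw, pvMax_sorted _ hpw, pvBlk_head, pvBlk_getLast,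
      PySem.List.foldl_append_singleton_eq_map, List.nil_append]
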